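-- pv_equiv track=rewrite | github.com/tommasofiori2000-glitch/email-classifier-ml | PROGETTO1__FINEEE.py | fn_group2
-- ===== SOURCE A (Python) =====
-- def fn_group2(text, groups_list):
--     s = ""
--     # prepare text split
--     new_text = text.replace("'", " ")
--     new_text = new_text.replace(".", " ")
--     new_text = new_text.replace(",", " ")
--     new_text = new_text.replace(";", " ")
--     new_text = new_text.replace("!", " ")
--     new_text = new_text.replace("?", " ")
--     new_text = new_text.lower()
--     text_list = new_text.split()
--
--     #  counters elaboration
--     group_counters = []
--     n = 0
--     for group in groups_list:
--         cnt = 0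
--         for key in group:
--             key_lower = key.lower()
--             for word in text_list:
--                 if word.find(key_lower) == 0:
--                    cnt += 1
--
--         group_counters.append(cnt)
--         n += 1
--     # use maximum rule
--     max = 0
--     for i in range(n):
--         if max < group_counters[i]:
--             max = group_counters[i]
--
--     # check null counters
--     if max == 0:
--         return s
--
--     for i in range(n):
--         if max == group_counters[i]:
--             s += str(i + 1)
--     return s
-- ===== SOURCE B (Python) =====
-- def fn_group2(text, groups_list):
--     # same text preparation as the original
--     new_text = text
--     for ch in "'.,;!?":
--         new_text = new_text.replace(ch, " ")
--     words = sorted(new_text.lower().split())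
--     n_words = len(words)
--
--     def first_false(pred, lo, hi):
--         # first index in [lo, hi) where pred fails (pred true on a prefix of the range)
--         while lo < hi:
--             mid = (lo + hi) // 2
--             if pred(mid):
--                 lo = mid + 1
--             else:
--                 hi = mid
--         return lo
--
--     def prefix_count(key):
--         # words with prefix `key` form a contiguous block of the sorted list
--         left = first_false(lambda i: words[i] < key, 0, n_words)
--         right = first_false(lambda i: words[i].startswith(key), left, n_words)
--         return right - left
--
--     counts = [sum(prefix_count(key.lower()) for key in group) for group in groups_list]
--     m = max(counts, default=0)
--     if m == 0:
--         return ""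
--     return "".join(str(i + 1) for i, c in enumerate(counts) if c == m)
-- ===== Notes on version B (the rewrite author's own statement) =====
-- stated objective: faster
-- what changed: Instead of scanning the whole word list for every key of every group, B sorts the word list once and counts each key's prefix matches with two binary searches over the contiguous block of matching words; max and the index string are built with max()/join over the counts list.
import Mathlib
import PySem

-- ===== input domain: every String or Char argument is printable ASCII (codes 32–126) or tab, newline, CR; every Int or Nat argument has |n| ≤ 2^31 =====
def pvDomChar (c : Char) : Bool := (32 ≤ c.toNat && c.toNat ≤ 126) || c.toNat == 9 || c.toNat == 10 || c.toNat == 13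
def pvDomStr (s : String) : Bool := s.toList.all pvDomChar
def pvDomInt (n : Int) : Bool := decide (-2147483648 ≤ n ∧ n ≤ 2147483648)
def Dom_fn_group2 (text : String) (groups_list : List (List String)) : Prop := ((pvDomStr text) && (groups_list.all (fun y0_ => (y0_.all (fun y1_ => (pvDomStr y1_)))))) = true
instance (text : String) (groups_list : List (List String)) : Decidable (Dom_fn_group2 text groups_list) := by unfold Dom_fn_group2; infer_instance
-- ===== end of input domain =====

-- B sorts the word list once and counts the prefix matches of each key by binary
-- searching the contiguous block of words starting with it (objective: faster).

-- ===== PORT A =====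
def fn_group2 (text : String) (groups_list : List (List String)) : String :=
  let s := ""
  let new_text := PySem.Str.replace text "'" " "
  let new_text := PySem.Str.replace new_text "." " "
  let new_text := PySem.Str.replace new_text "," " "
  let new_text := PySem.Str.replace new_text ";" " "
  let new_text := PySem.Str.replace new_text "!" " "
  let new_text := PySem.Str.replace new_text "?" " "
  let new_text := PySem.Str.lower new_text
  let text_list := PySem.Str.split₀ new_text
  let st := groups_list.foldl (fun (st : List Int × Int) group =>
      let cnt := group.foldl (fun cnt key =>
          let key_lower := PySem.Str.lower key
          text_list.foldl (fun cnt word =>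
              if PySem.Str.find word key_lower == 0 then cnt + 1 else cnt) cnt)
        (0 : Int)
      (st.1 ++ [cnt], st.2 + 1)) ([], (0 : Int))
  let group_counters := st.1
  let n := st.2
  let max := (PySem.List.pyRange 0 n).foldl (fun max i =>
      if max < PySem.List.pyGetD group_counters i 0 then PySem.List.pyGetD group_counters i 0
      else max) (0 : Int)
  if max == 0 then s
  else (PySem.List.pyRange 0 n).foldl (fun s i =>
      if max == PySem.List.pyGetD group_counters i 0 then s ++ PySem.Int.toStr (i + 1) else s) s

-- ===== PORT B =====
def pvFirstFalse (pred : Int → Bool) (lo hi : Int) : Int :=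
  if h : lo < hi then
    let mid := PySem.Int.floordiv (lo + hi) 2
    if pred mid then pvFirstFalse pred (mid + 1) hi else pvFirstFalse pred lo mid
  else lo
termination_by (hi - lo).toNat
decreasing_by
  · have h1 := (PySem.Int.floordiv_two_mid_bounds (le_of_lt h)).1
    have h2 := (PySem.Int.floordiv_lt_iff_lt_mul (a := lo + hi) (b := 2) (q := hi)
      (by norm_num : (0:Int) < 2)).mpr (by omega)
    omega
  · have h1 := (PySem.Int.floordiv_two_mid_bounds (le_of_lt h)).1
    have h2 := (PySem.Int.floordiv_lt_iff_lt_mul (a := lo + hi) (b := 2) (q := hi)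
      (by norm_num : (0:Int) < 2)).mpr (by omega)
    omega

def pvPrefixCount (words : List String) (n_words : Int) (key : String) : Int :=
  let left := pvFirstFalse (fun i => decide (PySem.List.pyGetD words i "" < key)) 0 n_words
  let right := pvFirstFalse (fun i => PySem.Str.startswith (PySem.List.pyGetD words i "") key)
      left n_words
  right - left

def fn_group2_alt (text : String) (groups_list : List (List String)) : String :=
  let new_text := "'.,;!?".toList.foldl (fun nt ch => PySem.Str.replace nt (String.ofList [ch]) " ") text
  let words := PySem.List.sorted (PySem.Str.split₀ (PySem.Str.lower new_text)) id
  let n_words := PySem.List.len words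
  let counts := groups_list.map (fun group =>
      (group.map (fun key => pvPrefixCount words n_words (PySem.Str.lower key))).sum)
  let m := PySem.List.maxD counts id 0
  if m == 0 then ""
  else PySem.Str.join ""
    (((PySem.List.enumerate counts).filter (fun p => p.2 == m)).map
      (fun p => PySem.Int.toStr (p.1 + 1)))

-- ===== PRECONDITION & SPEC =====
def Spec_fn_group2 (text : String) (groups_list : List (List String)) (out : String) : Prop := out = fn_group2_alt text groups_list
instance (text : String) (groups_list : List (List String)) (out : String) : Decidable (Spec_fn_group2 text groups_list out) := by unfold Spec_fn_group2; infer_instance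

-- ===== CLAIM (what is proved, stated in full; the proofs are below) =====
def Claim_equal_fn_group2 : Prop := ∀ (text : String) (groups_list : List (List String)), Dom_fn_group2 text groups_list → Spec_fn_group2 text groups_list (fn_group2 text groups_list)

-- ===== LEMMAS AND PROOFS =====

-- 'word.find(key) == 0' is exactly 'key is a prefix of word'
lemma find_eq_zero_iff (w k : String) :
    (PySem.Str.find w k == 0) = decide (k.toList <+: w.toList) := by
  rw [PySem.Str.find_eq]
  by_cases h : k.toList <+: w.toList
  · have hnn : 0 ≤ PySem.Chars.find w.toList k.toList :=
      (PySem.Chars.find_nonneg_iff _ _).2 h.isInfix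
    have hspec := PySem.Chars.find_spec hnn
    have hz : PySem.Chars.find w.toList k.toList = 0 := by
      by_contra hne
      have h0 : 0 < (PySem.Chars.find w.toList k.toList).toNat := by omega
      have := hspec.2 0 h0
      simp at this
      exact this h
    simp [hz, h]
  · have hz : PySem.Chars.find w.toList k.toList ≠ 0 := by
      intro hz
      have hnn : 0 ≤ PySem.Chars.find w.toList k.toList := by omega
      have hspec := PySem.Chars.find_spec hnn
      rw [hz] at hspec
      simp at hspec
      exact h hspec
    simp [hz, h]

lemma pvFirstFalse_spec_aux (n : Nat) (pred : Int → Bool) (lo hi : Int)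
    (hfl : (hi - lo).toNat ≤ n) (hlh : lo ≤ hi)
    (hmono : ∀ i j : Int, lo ≤ i → i ≤ j → j < hi → pred j = true → pred i = true) :
    lo ≤ pvFirstFalse pred lo hi ∧ pvFirstFalse pred lo hi ≤ hi ∧
    (∀ i, lo ≤ i → i < pvFirstFalse pred lo hi → pred i = true) ∧
    (∀ i, pvFirstFalse pred lo hi ≤ i → i < hi → pred i = false) := by
  induction n generalizing lo hi with
  | zero =>
    have : ¬ lo < hi := by omega
    rw [pvFirstFalse, dif_neg this]
    refine ⟨le_refl _, hlh, ?_, ?_⟩ <;> intro i h1 h2 <;> omega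
  | succ n ih =>
    by_cases h : lo < hi
    · rw [pvFirstFalse, dif_pos h]
      have hmlo := (PySem.Int.floordiv_two_mid_bounds (le_of_lt h)).1
      have hmhi := (PySem.Int.floordiv_lt_iff_lt_mul (a := lo + hi) (b := 2) (q := hi) (by norm_num : (0:Int) < 2)).mpr
        (by omega)
      set mid := PySem.Int.floordiv (lo + hi) 2 with hmid
      by_cases hp : pred mid = true
      · rw [if_pos hp]
        obtain ⟨s1, s2, s3, s4⟩ := ih (mid + 1) hi (by omega) (by omega)
          (fun i j hi' hij hj hpj => hmono i j (by omega) hij hj hpj)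
        refine ⟨by omega, s2, ?_, s4⟩
        intro i h1 h2
        by_cases hc : mid + 1 ≤ i
        · exact s3 i hc h2
        · exact hmono i mid h1 (by omega) hmhi hp
      · rw [if_neg hp]
        obtain ⟨s1, s2, s3, s4⟩ := ih lo mid (by omega) (by omega)
          (fun i j hi' hij hj hpj => hmono i j hi' hij (by omega) hpj)
        refine ⟨s1, by omega, s3, ?_⟩
        intro i h1 h2
        by_cases hc : i < mid
        · exact s4 i h1 hc
        · by_contra hcon
          have hpi : pred i = true := by
            cases hx : pred i
            · exact absurd hx hcon
            · rfl
          exact absurd (hmono mid i (by omega) (by omega) h2 hpi) (by simp [hp])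
    · have : lo = hi := by omega
      rw [pvFirstFalse, dif_neg h]
      refine ⟨le_refl _, hlh, ?_, ?_⟩ <;> intro i h1 h2 <;> omega

lemma pvFirstFalse_spec (pred : Int → Bool) (lo hi : Int) (hlh : lo ≤ hi)
    (hmono : ∀ i j : Int, lo ≤ i → i ≤ j → j < hi → pred j = true → pred i = true) :
    lo ≤ pvFirstFalse pred lo hi ∧ pvFirstFalse pred lo hi ≤ hi ∧
    (∀ i, lo ≤ i → i < pvFirstFalse pred lo hi → pred i = true) ∧
    (∀ i, pvFirstFalse pred lo hi ≤ i → i < hi → pred i = false) :=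
  pvFirstFalse_spec_aux (hi - lo).toNat pred lo hi (le_refl _) hlh hmono

lemma clex_nil_le (l : List Char) : ([] : List Char) ≤ l := by
  rcases List.lex_nil_or_eq_nil (r := (· < ·)) l with h | rfl
  · exact le_of_lt h
  · exact le_refl _

lemma clex_not_cons_le_nil (a : Char) (s : List Char) : ¬ (a :: s : List Char) ≤ [] := by
  intro h
  rcases lt_or_eq_of_le h with h | h
  · cases h
  · exact absurd h (by simp)

lemma clex_cons_le_cons_iff (a b : Char) (s t : List Char) :
    ((a :: s : List Char) ≤ b :: t) ↔ (a < b ∨ (a = b ∧ s ≤ t)) := by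
  constructor
  · intro h
    rcases lt_or_eq_of_le h with h | h
    · cases h with
      | rel h => exact Or.inl h
      | cons h => exact Or.inr ⟨rfl, le_of_lt h⟩
    · injection h with h1 h2
      exact Or.inr ⟨h1, le_of_eq h2⟩
  · rintro (hab | ⟨rfl, hst⟩)
    · exact le_of_lt (List.Lex.rel hab)
    · exact List.cons_le_cons a hst

lemma prefix_le_chars (k w : List Char) (h : k <+: w) : k ≤ w := by
  induction k generalizing w with
  | nil => exact clex_nil_le w
  | cons c k ih =>
    obtain ⟨t, rfl⟩ := h
    exact (clex_cons_le_cons_iff c c k (k ++ t)).mpr (Or.inr ⟨rfl, ih (k ++ t) ⟨t, rfl⟩⟩)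

lemma prefix_sandwich_chars (k w w' : List Char) (h1 : k ≤ w) (h2 : w ≤ w')
    (h3 : k <+: w') : k <+: w := by
  induction k generalizing w w' with
  | nil => exact List.nil_prefix
  | cons c k ih =>
    cases w with
    | nil => exact absurd h1 (clex_not_cons_le_nil c k)
    | cons a w1 =>
      cases w' with
      | nil => exact absurd (List.IsPrefix.length_le h3) (by simp)
      | cons b w2 =>
        obtain ⟨rfl, h3'⟩ := List.cons_prefix_cons.mp h3
        rcases (clex_cons_le_cons_iff _ _ _ _).mp h1 with hca | ⟨rfl, hkw⟩
        · rcases (clex_cons_le_cons_iff _ _ _ _).mp h2 with hab | ⟨heq, hw⟩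
          · exact absurd (hca.trans hab) (lt_irrefl c)
          · exact absurd (heq ▸ hca) (lt_irrefl c)
        · rcases (clex_cons_le_cons_iff _ _ _ _).mp h2 with hab | ⟨-, hw⟩
          · exact absurd hab (lt_irrefl c)
          · exact List.cons_prefix_cons.mpr ⟨rfl, ih w1 w2 hkw hw h3'⟩

lemma str_prefix_le (k w : String) (h : k.toList <+: w.toList) : k ≤ w :=
  String.le_iff_toList_le.mpr (prefix_le_chars _ _ h)

lemma str_prefix_sandwich (k w w' : String) (h1 : k ≤ w) (h2 : w ≤ w')
    (h3 : k.toList <+: w'.toList) : k.toList <+: w.toList :=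
  prefix_sandwich_chars _ _ _ (String.le_iff_toList_le.mp h1) (String.le_iff_toList_le.mp h2) h3

lemma map_getD_range {α : Type} (l : List α) (d : α) :
    (List.range l.length).map (fun j => l.getD j d) = l := by
  apply List.ext_getElem
  · simp
  · intro i h1 h2
    simp [List.getElem?_eq_getElem h2]

lemma countP_range_interval (a b n : Nat) :
    (List.range n).countP (fun i => decide (a ≤ i ∧ i < b)) = min b n - min a n := by
  induction n with
  | zero => simp
  | succ m ih =>
    rw [List.range_succ, List.countP_append, ih]
    simp only [List.countP_cons, List.countP_nil, zero_add]
    by_cases h : a ≤ m ∧ m < b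
    · have hd : decide (a ≤ m ∧ m < b) = true := by simpa using h
      rw [hd, if_pos rfl]
      omega
    · have hd : decide (a ≤ m ∧ m < b) = false := by simpa using h
      rw [hd]
      simp only [Bool.false_eq_true, if_false]
      omega

lemma prefixCount_eq (ws : List String) (key : String) (hp : List.Pairwise (· ≤ ·) ws) :
    pvPrefixCount ws (PySem.List.len ws) key
      = ((ws.countP (fun w => decide (key.toList <+: w.toList)) : Nat) : Int) := by
  have hget : ∀ i j : Nat, i ≤ j → j < ws.length → ws.getD i "" ≤ ws.getD j "" := by
    intro i j hij hj
    rcases Nat.eq_or_lt_of_le hij with rfl | hlt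
    · exact le_refl _
    · rw [List.getD_eq_getElem _ _ (by omega), List.getD_eq_getElem _ _ hj]
      exact List.pairwise_iff_getElem.mp hp i j (by omega) hj hlt
  have hmono1 : ∀ i j : Int, 0 ≤ i → i ≤ j → j < (ws.length : Int) →
      (fun i => decide (PySem.List.pyGetD ws i "" < key)) j = true →
      (fun i => decide (PySem.List.pyGetD ws i "" < key)) i = true := by
    intro i j h0 hij hj hpj
    simp only [PySem.List.pyGetD_of_nonneg _ _ h0, decide_eq_true_eq]
    simp only [PySem.List.pyGetD_of_nonneg _ _ (by omega : (0:Int) ≤ j), decide_eq_true_eq] at hpj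
    exact lt_of_le_of_lt (hget i.toNat j.toNat (by omega) (by omega)) hpj
  obtain ⟨hl0, hln, hlt_all, hge_all⟩ := pvFirstFalse_spec
    (fun i => decide (PySem.List.pyGetD ws i "" < key)) 0 (ws.length : Int) (by positivity) hmono1
  set left := pvFirstFalse (fun i => decide (PySem.List.pyGetD ws i "" < key)) 0 (ws.length : Int)
    with hleft
  have hlow : ∀ i : Nat, (i : Int) < left → ws.getD i "" < key := by
    intro i h
    have := hlt_all (i : Int) (by positivity) h
    simpa [PySem.List.pyGetD_of_nonneg _ _ (by positivity : (0:Int) ≤ (i:Int))] using this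
  have hhigh : ∀ i : Nat, left ≤ (i : Int) → i < ws.length → key ≤ ws.getD i "" := by
    intro i h1 h2
    have := hge_all (i : Int) h1 (by omega)
    simp only [PySem.List.pyGetD_of_nonneg _ _ (by positivity : (0:Int) ≤ (i:Int)),
      decide_eq_false_iff_not, Int.toNat_natCast] at this
    exact le_of_not_gt this
  have hmono2 : ∀ i j : Int, left ≤ i → i ≤ j → j < (ws.length : Int) →
      (fun i => PySem.Str.startswith (PySem.List.pyGetD ws i "") key) j = true →
      (fun i => PySem.Str.startswith (PySem.List.pyGetD ws i "") key) i = true := by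
    intro i j h1 hij hj hpj
    have h0i : (0:Int) ≤ i := le_trans hl0 h1
    simp only [PySem.List.pyGetD_of_nonneg _ _ h0i, PySem.Str.startswith_eq] at ⊢
    simp only [PySem.List.pyGetD_of_nonneg _ _ (by omega : (0:Int) ≤ j),
      PySem.Str.startswith_eq] at hpj
    rw [PySem.Chars.startswith_iff] at hpj ⊢
    exact str_prefix_sandwich key _ _
      (hhigh i.toNat (by omega) (by omega))
      (hget i.toNat j.toNat (by omega) (by omega)) hpj
  obtain ⟨hrl, hrn, hin_all, hout_all⟩ := pvFirstFalse_spec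
    (fun i => PySem.Str.startswith (PySem.List.pyGetD ws i "") key) left (ws.length : Int)
    hln hmono2
  set right := pvFirstFalse (fun i => PySem.Str.startswith (PySem.List.pyGetD ws i "") key)
    left (ws.length : Int) with hright
  have hchar : ∀ i : Nat, i < ws.length →
      (decide (key.toList <+: (ws.getD i "").toList) = true ↔ (left ≤ (i:Int) ∧ (i:Int) < right)) := by
    intro i hi
    simp only [decide_eq_true_eq]
    constructor
    · intro hpre
      constructor
      · by_contra hc
        push Not at hc
        exact absurd (str_prefix_le key _ hpre) (not_le.mpr (hlow i hc))
      · by_contra hc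
        push Not at hc
        have := hout_all (i : Int) hc (by omega)
        simp only [PySem.List.pyGetD_of_nonneg _ _ (by positivity : (0:Int) ≤ (i:Int)),
          PySem.Str.startswith_eq, Int.toNat_natCast] at this
        rw [← PySem.Chars.startswith_iff] at hpre
        rw [this] at hpre
        exact Bool.false_ne_true hpre
    · rintro ⟨h1, h2⟩
      have := hin_all (i : Int) h1 h2
      simp only [PySem.List.pyGetD_of_nonneg _ _ (by positivity : (0:Int) ≤ (i:Int)),
        PySem.Str.startswith_eq, Int.toNat_natCast] at this
      exact (PySem.Chars.startswith_iff _ _).mp this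
  have hcount : ws.countP (fun w => decide (key.toList <+: w.toList))
      = (List.range ws.length).countP (fun i => decide (left.toNat ≤ i ∧ i < right.toNat)) := by
    conv_lhs => rw [← map_getD_range ws ""]
    rw [List.countP_map]
    apply List.countP_congr
    intro i hi
    simp only [List.mem_range] at hi
    simp only [Function.comp_apply, decide_eq_true_eq]
    rw [← decide_eq_true_eq (p := key.toList <+: (ws.getD i "").toList)]
    rw [hchar i hi]
    constructor <;> intro h <;> omega
  have hfinal : pvPrefixCount ws (PySem.List.len ws) key = right - left := by
    simp only [pvPrefixCount, PySem.List.len, ← hleft, ← hright]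
  rw [hfinal, hcount, countP_range_interval]
  omega

-- the sorted list is a permutation of the words, so per-key counts transfer back
lemma pvPrefixCount_sorted_eq (ws0 : List String) (key : String) :
    pvPrefixCount (PySem.List.sorted ws0 id) (PySem.List.len (PySem.List.sorted ws0 id)) key
      = ((ws0.countP (fun w => decide (key.toList <+: w.toList)) : Nat) : Int) := by
  have hp : List.Pairwise (· ≤ ·) (PySem.List.sorted ws0 id) := by
    have := PySem.List.sorted_pairwise ws0 id
    simpa using this
  rw [prefixCount_eq _ _ hp]
  norm_cast
  exact List.Perm.countP_eq _ (PySem.List.sorted_perm ws0 id false)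

lemma max?_cons (xs : List Int) (a : Int) :
    PySem.List.max? (a :: xs) id = some (xs.foldl (fun m x => if m < x then x else m) a) := by
  induction xs generalizing a with
  | nil => rfl
  | cons x xs ih =>
    have step : PySem.List.max? (a :: x :: xs) id
        = PySem.List.max? ((if a < x then x else a) :: xs) id := by
      by_cases hax : a < x <;> simp [PySem.List.max?, hax]
    rw [step, ih]
    simp only [List.foldl_cons]

-- Python's max fold with strict '<' starting at 0 equals max(counts, default=0) on nonneg values
lemma fold_max_eq_maxD (l : List Int) (h : ∀ x ∈ l, 0 ≤ x) :
    l.foldl (fun m x => if m < x then x else m) 0 = PySem.List.maxD l id 0 := by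
  cases l with
  | nil => rfl
  | cons x xs =>
    have hx : (if (0:Int) < x then x else 0) = x := by
      have := h x (by simp)
      split <;> omega
    rw [PySem.List.maxD, max?_cons, List.foldl_cons, hx]
    rfl

lemma enumerate_eq_map_range (l : List Int) (k : Int) :
    PySem.List.enumerate l k
      = (List.range l.length).map (fun (j : Nat) => (k + (j : Int), l.getD j 0)) := by
  induction l generalizing k with
  | nil => simp [PySem.List.enumerate]
  | cons x xs ih =>
    simp only [PySem.List.enumerate, List.length_cons]
    rw [List.range_succ_eq_map, List.map_cons, List.map_map]
    simp only [Function.comp_def, Nat.succ_eq_add_one, List.getD_cons_zero,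
      List.getD_cons_succ, Nat.cast_zero, add_zero]
    rw [ih]
    congr 1
    apply List.map_congr_left
    intro j hj
    refine Prod.ext ?_ rfl
    push_cast
    ring

lemma strjoin_empty_nil : PySem.Str.join "" ([] : List String) = "" := by
  apply String.toList_inj.mp
  simp [PySem.Str.toList_join, PySem.Chars.join_nil]

lemma strjoin_empty_cons (p : String) (ps : List String) :
    PySem.Str.join "" (p :: ps) = p ++ PySem.Str.join "" ps := by
  apply String.toList_inj.mp
  cases ps with
  | nil =>
    simp [PySem.Str.toList_join, PySem.Chars.join_singleton, PySem.Chars.join_nil]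
  | cons q qs =>
    simp [PySem.Str.toList_join, PySem.Chars.join_cons_cons]

-- A's string-building fold equals B's join over the filtered enumeration
lemma fold_append_eq_join (m : Int) (pairs : List (Int × Int)) (acc : String) :
    pairs.foldl (fun s p => if m == p.2 then s ++ PySem.Int.toStr (p.1 + 1) else s) acc
      = acc ++ PySem.Str.join "" ((pairs.filter (fun p => p.2 == m)).map
          (fun p => PySem.Int.toStr (p.1 + 1))) := by
  induction pairs generalizing acc with
  | nil => simp [strjoin_empty_nil]
  | cons p ps ih =>
    simp only [List.foldl_cons, List.filter_cons]
    by_cases hm : m = p.2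
    · subst hm
      simp only [beq_self_eq_true, if_true, List.map_cons]
      rw [ih, strjoin_empty_cons, ← String.append_assoc]
    · have h1 : (m == p.2) = false := by simp [hm]
      have h2 : (p.2 == m) = false := by simp [Ne.symm hm]
      simp only [h1, h2, Bool.false_eq_true, if_false]
      exact ih acc

-- a fold over range(len(l)) reading l[j] is a fold over l
lemma foldl_range_getD {β : Type} (l : List Int) (f : β → Int → β) (a : β) :
    (List.range l.length).foldl (fun m j => f m (l.getD j 0)) a = l.foldl f a := by
  rw [← List.foldl_map (f := fun j => l.getD j 0) (g := f), map_getD_range]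

lemma foldl_range_max (l : List Int) (a : Int) :
    (List.range l.length).foldl (fun m j => if m < l.getD j 0 then l.getD j 0 else m) a
      = l.foldl (fun m x => if m < x then x else m) a :=
  foldl_range_getD l (fun m x => if m < x then x else m) a

-- A's index loop over the counters is a loop over their enumeration
lemma foldl_range_pairs (l : List Int) (m : Int) (acc : String) :
    (List.range l.length).foldl (fun s j =>
        if m == l.getD j 0 then s ++ PySem.Int.toStr ((j : Int) + 1) else s) acc
      = (PySem.List.enumerate l).foldl (fun s p =>
        if m == p.2 then s ++ PySem.Int.toStr (p.1 + 1) else s) acc := by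
  rw [enumerate_eq_map_range l 0, List.foldl_map]
  simp only [zero_add]

-- A's counter-pair loop produces the per-group counts and the group count
lemma counters_eq (words : List String) (groups : List (List String)) :
    groups.foldl (fun (st : List Int × Int) group =>
      (st.1 ++ [group.foldl (fun cnt key =>
          words.foldl (fun cnt word =>
            if PySem.Str.find word (PySem.Str.lower key) == 0 then cnt + 1 else cnt) cnt) 0],
       st.2 + 1)) ([], 0)
    = (groups.map (fun group => group.foldl (fun cnt key =>
          words.foldl (fun cnt word =>
            if PySem.Str.find word (PySem.Str.lower key) == 0 then cnt + 1 else cnt) cnt) 0),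
       (groups.length : Int)) := by
  have h := PySem.List.foldl_prod_mk
      (f := fun (acc : List Int) (group : List String) => acc ++ [group.foldl (fun cnt key =>
          words.foldl (fun cnt word =>
            if PySem.Str.find word (PySem.Str.lower key) == 0 then cnt + 1 else cnt) cnt) 0])
      (g := fun (n : Int) _ => n + 1) groups ([] : List Int) (0 : Int)
  simp only [] at h
  rw [h, PySem.List.foldl_append_singleton_eq_map, PySem.List.foldl_add (g := fun _ => (1 : Int))]
  simp

-- A's per-group count is the sum over the group's keys of the prefix-match counts
lemma cnt_eq_sum (words : List String) (group : List String) :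
    group.foldl (fun cnt key => words.foldl (fun cnt word =>
        if PySem.Str.find word (PySem.Str.lower key) == 0 then cnt + 1 else cnt) cnt) 0
    = (group.map (fun key =>
        ((words.countP (fun w => (PySem.Str.lower key).toList <+: w.toList) : Nat) : Int))).sum := by
  rw [PySem.List.foldl_congr_mem group _
        (fun cnt key => cnt +
          ((words.countP (fun w => (PySem.Str.lower key).toList <+: w.toList) : Nat) : Int)) 0 ?_]
  · rw [PySem.List.foldl_add]; simp
  · intro acc key _
    rw [PySem.List.foldl_count_if]
    have hc : List.countP (fun word => PySem.Str.find word (PySem.Str.lower key) == 0) words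
        = List.countP (fun w => decide ((PySem.Str.lower key).toList <+: w.toList)) words := by
      apply List.countP_congr
      intro w _
      rw [find_eq_zero_iff]
    rw [hc]

-- ===== VERDICT (by name: the statement is the Claim_ definition above) =====
set_option maxHeartbeats 1600000 in
theorem fn_group2_spec : Claim_equal_fn_group2 := by
  intro text groups_list _
  unfold Spec_fn_group2
  simp only [fn_group2, fn_group2_alt]
  have hrep : "'.,;!?".toList.foldl
      (fun nt ch => PySem.Str.replace nt (String.ofList [ch]) " ") text
      = PySem.Str.replace (PySem.Str.replace (PySem.Str.replace (PySem.Str.replace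
          (PySem.Str.replace (PySem.Str.replace text "'" " ") "." " ") "," " ") ";" " ")
          "!" " ") "?" " " := rfl
  rw [hrep]
  set words := PySem.Str.split₀ (PySem.Str.lower (PySem.Str.replace (PySem.Str.replace
      (PySem.Str.replace (PySem.Str.replace (PySem.Str.replace
      (PySem.Str.replace text "'" " ") "." " ") "," " ") ";" " ") "!" " ") "?" " ")) with hwords
  rw [counters_eq words groups_list]
  simp only [pvPrefixCount_sorted_eq]
  simp only [cnt_eq_sum words]
  set counts := groups_list.map (fun group => (group.map (fun key =>
      ((words.countP (fun w => (PySem.Str.lower key).toList <+: w.toList) : Nat) : Int))).sum)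
    with hcounts
  have hnn : ∀ x ∈ counts, 0 ≤ x := by
    intro x hx
    obtain ⟨g, -, rfl⟩ := List.mem_map.mp hx
    apply List.sum_nonneg
    intro y hy
    obtain ⟨key, -, rfl⟩ := List.mem_map.mp hy
    positivity
  have hlc : (groups_list.length : Int) = (counts.length : Int) := by
    rw [hcounts, List.length_map]
  rw [hlc]
  simp only [PySem.List.pyRange_zero_natCast, List.foldl_map, PySem.List.pyGetD_natCast]
  rw [foldl_range_max, fold_max_eq_maxD counts hnn, foldl_range_pairs, fold_append_eq_join]
  simp
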